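-- pv_equiv track=rewrite | github.com/mckayje3/rms-importer | backend/services/daily_log_parser.py | _skip_header
-- ===== SOURCE A (Python) =====
-- def _skip_header(text: str, expected_column_marker: str) -> str:
--     """Skip metadata header lines and return CSV text from the column header onward.
--
--     All RMS QC exports have 4 metadata lines followed by the column header row.
--     """
--     lines = text.split("\n")
--     for i, line in enumerate(lines):
--         if line.startswith(expected_column_marker):
--             return "\n".join(lines[i:])
--     # Fallback: skip first 4 lines
--     if len(lines) > 4:
--         return "\n".join(lines[4:])
--     return text
-- ===== SOURCE B (Python) =====
-- def _skip_header(text: str, expected_column_marker: str) -> str: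
--     """Offset-based rewrite: walk newline positions on the raw string instead of
--     building a list of lines; return the suffix of text directly (no split/join)."""
--     rest = text
--     while True:
--         nl = rest.find("\n")
--         line_end = len(rest) if nl == -1 else nl
--         # marker must fit within the current line and be a prefix of it
--         if len(expected_column_marker) <= line_end and rest.startswith(expected_column_marker):
--             return rest
--         if nl == -1:
--             break
--         rest = rest[nl + 1:]
--     # Fallback: skip past the 4th newline if there is one
--     rest = text
--     for _ in range(4):
--         nl = rest.find("\n")
--         if nl == -1:
--             return text
--         rest = rest[nl + 1:]
--     return rest
-- ===== Notes on version B (the rewrite author's own statement) =====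
-- stated objective: alternative
-- what changed: Replaces split-into-a-list-of-lines with an offset/suffix scan over the raw string: walk newline positions, test the marker as a prefix of each suffix (bounded by the line end), and return the suffix directly, so no line list is built and no join is performed.
import Mathlib
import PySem

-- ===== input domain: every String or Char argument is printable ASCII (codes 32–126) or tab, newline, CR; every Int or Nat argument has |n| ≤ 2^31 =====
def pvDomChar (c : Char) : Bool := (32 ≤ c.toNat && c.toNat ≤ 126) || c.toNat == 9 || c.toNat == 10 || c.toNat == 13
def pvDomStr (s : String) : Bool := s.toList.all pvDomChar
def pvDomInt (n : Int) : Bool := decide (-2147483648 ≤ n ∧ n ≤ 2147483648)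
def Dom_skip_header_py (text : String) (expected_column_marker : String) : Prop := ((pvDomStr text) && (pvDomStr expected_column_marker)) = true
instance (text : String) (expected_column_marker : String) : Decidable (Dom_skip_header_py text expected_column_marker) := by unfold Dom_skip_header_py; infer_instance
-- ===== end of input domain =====

-- B rewrites A's split-into-lines scan as an offset/suffix scan on the raw string (no list of lines, no join).

-- ===== PORT A =====
-- the 'for i, line in enumerate(lines): if line.startswith(m): return "\n".join(lines[i:])' loop:
-- returns the remaining lines (lines[i:]) at the first match, none if no line matches
def aFind (marker : List Char) : List (List Char) → Option (List (List Char))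
  | [] => none
  | l :: ls => if PySem.Chars.startswith l marker then some (l :: ls) else aFind marker ls

def skip_header_py (text : String) (expected_column_marker : String) : String :=
  let lines := PySem.Chars.splitOn text.toList ['\n']
  match aFind expected_column_marker.toList lines with
  | some tl => String.ofList (PySem.Chars.join ['\n'] tl)
  | none =>
    if lines.length > 4 then String.ofList (PySem.Chars.join ['\n'] (lines.drop 4)) else text

-- ===== PORT B =====
-- the 'while True' search loop of Source B: rest is the current suffix of text
def bSearch (marker : List Char) (rest : List Char) : Option (List Char) :=
  let nl := PySem.Chars.find rest ['\n']
  let lineEnd := if nl = -1 then rest.length else nl.toNat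
  if marker.length ≤ lineEnd ∧ PySem.Chars.startswith rest marker = true then some rest
  else if h : nl = -1 then none
  else bSearch marker (rest.drop (nl.toNat + 1))
termination_by rest.length
decreasing_by
  cases rest with
  | nil => exact absurd (by decide) h
  | cons c t => simp

-- the 'for _ in range(4)' fallback loop of Source B
def bSkip : Nat → List Char → Option (List Char)
  | 0, rest => some rest
  | k + 1, rest =>
    let nl := PySem.Chars.find rest ['\n']
    if nl = -1 then none else bSkip k (rest.drop (nl.toNat + 1))

def skip_header_py_alt (text : String) (expected_column_marker : String) : String :=
  match bSearch expected_column_marker.toList text.toList with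
  | some r => String.ofList r
  | none =>
    match bSkip 4 text.toList with
    | some r => String.ofList r
    | none => text

-- ===== PRECONDITION & SPEC =====
def Spec_skip_header_py (text : String) (expected_column_marker : String) (out : String) : Prop := out = skip_header_py_alt text expected_column_marker
instance (text : String) (expected_column_marker : String) (out : String) : Decidable (Spec_skip_header_py text expected_column_marker out) := by unfold Spec_skip_header_py; infer_instance

-- ===== CLAIM (what is proved, stated in full; the proofs are below) =====
def Claim_equal_skip_header_py : Prop := ∀ (text : String) (expected_column_marker : String), Dom_skip_header_py text expected_column_marker → Spec_skip_header_py text expected_column_marker (skip_header_py text expected_column_marker)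

-- ===== LEMMAS AND PROOFS =====

-- prepend a prefix onto the head piece (helper to characterize splitOn's accumulator)
def glueL (p : List Char) : List (List Char) → List (List Char)
  | [] => [p]
  | x :: xs => (p ++ x) :: xs

-- structural reformulation of splitting on '\n'
def mySplit : List Char → List (List Char)
  | [] => [[]]
  | c :: rest => if c = '\n' then [] :: mySplit rest else glueL [c] (mySplit rest)

theorem mySplit_ne_nil (cs : List Char) : mySplit cs ≠ [] := by
  induction cs with
  | nil => simp [mySplit]
  | cons c rest ih =>
    simp only [mySplit]
    split
    · simp
    · cases h : mySplit rest with
      | nil => exact absurd h ih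
      | cons x xs => simp [glueL]

theorem go_spec : ∀ (fuel : Nat) (l cur : List Char) (acc : List (List Char)),
    l.length ≤ fuel →
    PySem.Chars.splitOn.go ['\n'] fuel l cur acc = acc.reverse ++ glueL cur.reverse (mySplit l) := by
  intro fuel
  induction fuel with
  | zero =>
    intro l cur acc h
    have : l = [] := by cases l <;> simp_all
    subst this
    simp [PySem.Chars.splitOn.go, mySplit, glueL]
  | succ n ih =>
    intro l cur acc h
    cases l with
    | nil => simp [PySem.Chars.splitOn.go, mySplit, glueL]
    | cons c rest =>
      by_cases hc : c = '\n'
      · subst hc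
        have hpre : List.isPrefixOf ['\n'] ('\n' :: rest) = true := by simp [List.isPrefixOf]
        rw [PySem.Chars.splitOn.go, if_pos hpre]
        simp only [List.length_cons] at h
        rw [ih _ _ _ (by simpa using Nat.le_of_succ_le_succ h)]
        cases hms : mySplit rest with
        | nil => exact absurd hms (mySplit_ne_nil rest)
        | cons x xs => simp [mySplit, glueL, hms]
      · have hpre : List.isPrefixOf ['\n'] (c :: rest) = false := by
          simp [List.isPrefixOf]; exact fun h' => absurd h'.symm hc
        rw [PySem.Chars.splitOn.go, if_neg (by simp [hpre])]
        simp only [List.length_cons] at h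
        rw [ih _ _ _ (Nat.le_of_succ_le_succ h)]
        cases hms : mySplit rest with
        | nil => exact absurd hms (mySplit_ne_nil rest)
        | cons x xs => simp [mySplit, glueL, hms, hc]

theorem splitOn_eq_mySplit (cs : List Char) : PySem.Chars.splitOn cs ['\n'] = mySplit cs := by
  rw [PySem.Chars.splitOn, go_spec (cs.length + 1) cs [] [] (by omega)]
  cases hms : mySplit cs with
  | nil => exact absurd hms (mySplit_ne_nil cs)
  | cons x xs => simp [glueL]

-- join is the inverse of mySplit
theorem join_mySplit (cs : List Char) : PySem.Chars.join ['\n'] (mySplit cs) = cs := by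
  induction cs with
  | nil => simp [mySplit, PySem.Chars.join, List.intercalate]
  | cons c rest ih =>
    cases hms : mySplit rest with
    | nil => exact absurd hms (mySplit_ne_nil rest)
    | cons x xs =>
      rw [hms] at ih
      by_cases hc : c = '\n'
      · subst hc
        simp only [mySplit, hms]
        cases xs <;> simp_all [PySem.Chars.join, List.intercalate]
      · simp only [mySplit, if_neg hc, hms, glueL]
        cases xs <;> simp_all [PySem.Chars.join, List.intercalate]

-- Python一exact characterization of find on the single character '\n'
theorem findgo_newline : ∀ (l : List Char) (k : Nat),
    PySem.Chars.find.go ['\n'] l k = if '\n' ∈ l then ((k : Int) + l.idxOf '\n') else -1 := by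
  intro l
  induction l with
  | nil => intro k; simp [PySem.Chars.find.go]
  | cons c t ih =>
    intro k
    by_cases hc : c = '\n'
    · subst hc
      rw [PySem.Chars.find.go, if_pos (by simp [List.isPrefixOf])]
      simp
    · have hb : (c == '\n') = false := by simp [hc]
      rw [PySem.Chars.find.go, if_neg (by simp [List.isPrefixOf]; exact fun h' => absurd h'.symm hc), ih]
      by_cases hm : '\n' ∈ t
      · simp [hm, List.idxOf_cons, hb, Ne.symm hc]
        omega
      · simp [hm, Ne.symm hc]

theorem find_newline (cs : List Char) :
    PySem.Chars.find cs ['\n'] = if '\n' ∈ cs then ((cs.idxOf '\n' : Nat) : Int) else -1 := by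
  rw [PySem.Chars.find, findgo_newline]
  split <;> simp

theorem mySplit_of_not_mem {cs : List Char} (h : '\n' ∉ cs) : mySplit cs = [cs] := by
  induction cs with
  | nil => rfl
  | cons c rest ih =>
    simp only [List.mem_cons, not_or] at h
    rw [mySplit, if_neg (fun e => h.1 e.symm), ih h.2]
    simp [glueL]

theorem mySplit_of_mem {cs : List Char} (h : '\n' ∈ cs) :
    mySplit cs = cs.take (cs.idxOf '\n') :: mySplit (cs.drop (cs.idxOf '\n' + 1)) := by
  induction cs with
  | nil => simp at h
  | cons c rest ih =>
    by_cases hc : c = '\n'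
    · subst hc; simp [mySplit]
    · have hm : '\n' ∈ rest := by
        rcases List.mem_cons.1 h with h1 | h1
        · exact absurd h1.symm hc
        · exact h1
      have hb : (c == '\n') = false := by simp [hc]
      have hidx : List.idxOf '\n' (c :: rest) = List.idxOf '\n' rest + 1 := by
        simp [List.idxOf_cons, hb]
      rw [hidx, mySplit, if_neg hc, ih hm]
      simp [glueL]

theorem idxOf_newline_lt {cs : List Char} (h : '\n' ∈ cs) : cs.idxOf '\n' < cs.length :=
  List.idxOf_lt_length_of_mem h

-- the prefix test on a line equals the bounded prefix test on the suffix
theorem prefix_take_iff' (mk cs : List Char) (n : Nat) (_hn : n ≤ cs.length) :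
    (mk <+: cs.take n) ↔ (mk.length ≤ n ∧ mk <+: cs) := by
  constructor
  · intro hp
    have h1 : mk.length ≤ n := by
      have := hp.length_le; simp at this; omega
    exact ⟨h1, hp.trans (List.take_prefix n cs)⟩
  · rintro ⟨h1, h2⟩
    exact (List.prefix_take_iff).2 ⟨h2, h1⟩

-- main search-loop correspondence: A's scan over the lines of cs equals B's suffix scan
theorem search_eq (mk : List Char) : ∀ (cs : List Char),
    Option.map (PySem.Chars.join ['\n']) (aFind mk (mySplit cs)) = bSearch mk cs := by
  intro cs
  induction hn' : cs.length using Nat.strong_induction_on generalizing cs with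
  | _ n ih =>
  subst hn'
  by_cases hm : '\n' ∈ cs
  · have hlt := idxOf_newline_lt hm
    set j := cs.idxOf '\n' with hj
    rw [mySplit_of_mem hm]
    rw [bSearch]
    simp only [find_newline, if_pos hm]
    have hne : ((cs.idxOf '\n' : Nat) : Int) ≠ -1 := by omega
    rw [if_neg hne]
    have htoNat : ((cs.idxOf '\n' : Nat) : Int).toNat = cs.idxOf '\n' := by omega
    rw [htoNat]
    have hsw : PySem.Chars.startswith (cs.take (cs.idxOf '\n')) mk =
        (decide (mk.length ≤ cs.idxOf '\n') && PySem.Chars.startswith cs mk) := by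
      simp only [PySem.Chars.startswith]
      rw [Bool.eq_iff_iff]
      simp only [List.isPrefixOf_iff_prefix, Bool.and_eq_true, decide_eq_true_eq]
      exact prefix_take_iff' mk cs (cs.idxOf '\n') (le_of_lt hlt)
    by_cases hcond : mk.length ≤ cs.idxOf '\n' ∧ PySem.Chars.startswith cs mk = true
    · rw [if_pos hcond]
      have : PySem.Chars.startswith (cs.take (cs.idxOf '\n')) mk = true := by
        rw [hsw]; simp [hcond.1, hcond.2]
      rw [aFind, if_pos this]
      simp only [Option.map_some]
      rw [← mySplit_of_mem hm, join_mySplit]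
    · rw [if_neg hcond]
      have : PySem.Chars.startswith (cs.take (cs.idxOf '\n')) mk = false := by
        rw [hsw]
        rcases not_and_or.1 hcond with h | h
        · simp [h]
        · simp [Bool.eq_false_iff.2 h]
      rw [aFind, if_neg (by simp [this])]
      exact ih (cs.drop (cs.idxOf '\n' + 1)).length (by simp; omega) _ rfl
  · rw [mySplit_of_not_mem hm]
    rw [bSearch]
    simp only [find_newline, if_neg hm]
    by_cases hsw : PySem.Chars.startswith cs mk = true
    · have hlen : mk.length ≤ cs.length := by
        have : mk <+: cs := by simpa [PySem.Chars.startswith, List.isPrefixOf_iff_prefix] using hsw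
        exact this.length_le
      rw [if_pos ⟨hlen, hsw⟩]
      rw [aFind, if_pos hsw]
      simp only [Option.map_some]
      rw [← mySplit_of_not_mem hm, join_mySplit]
    · rw [if_neg (by tauto)]
      rw [aFind, if_neg (by simp [Bool.eq_false_iff.2 hsw]), aFind]
      simp

-- fallback correspondence: skipping k '\n's equals dropping k lines
theorem skip_eq : ∀ (k : Nat) (cs : List Char),
    bSkip k cs = if k < (mySplit cs).length
      then some (PySem.Chars.join ['\n'] ((mySplit cs).drop k)) else none := by
  intro k
  induction k with
  | zero =>
    intro cs
    have := mySplit_ne_nil cs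
    rw [if_pos (by cases hms : mySplit cs with | nil => exact absurd hms this | cons x xs => simp)]
    simp [bSkip, join_mySplit]
  | succ k ih =>
    intro cs
    by_cases hm : '\n' ∈ cs
    · have hlt := idxOf_newline_lt hm
      rw [bSkip]
      simp only [find_newline, if_pos hm]
      have hne : ((cs.idxOf '\n' : Nat) : Int) ≠ -1 := by omega
      rw [if_neg hne]
      have htoNat : ((cs.idxOf '\n' : Nat) : Int).toNat = cs.idxOf '\n' := by omega
      rw [htoNat, ih, mySplit_of_mem hm]
      simp
    · rw [mySplit_of_not_mem hm, bSkip]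
      simp [find_newline, hm]

-- ===== VERDICT (by name: the statement is the Claim_ definition above) =====
theorem skip_header_py_spec : Claim_equal_skip_header_py := by
  intro text marker _
  unfold Spec_skip_header_py skip_header_py skip_header_py_alt
  rw [splitOn_eq_mySplit, ← search_eq marker.toList text.toList, skip_eq]
  cases haf : aFind marker.toList (mySplit text.toList) with
  | some tl => simp [haf]
  | none =>
    simp only [haf, Option.map_none]
    by_cases h4 : 4 < (mySplit text.toList).length
    · simp [h4, gt_iff_lt]
    · simp [h4, gt_iff_lt]
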